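-- pv_equiv track=rewrite | github.com/reacho/dominance_order | main.py | who_is_larger__pair
-- ===== SOURCE A (Python) =====
-- def compute_all_sum(v_base, v_exp):
--     partial_sum = 0
--     v_sum = []
--     for base, exp in zip(v_base, v_exp):
--         v_sum_aus = []
--         for cont_1 in range(len(base)):
--             b = base[cont_1]
--             e = exp[cont_1]
--             for _ in range(e):
--                 partial_sum += b
--                 v_sum_aus.append(partial_sum)
--         v_sum.append(v_sum_aus)
--
--     return v_sum
--
-- def who_is_larger__pair(pair_1, pair_2):
--     v_base_1, v_exp_1 = pair_1
--     v_base_2, v_exp_2 = pair_2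
--     my_sum_1 = compute_all_sum(v_base_1, v_exp_1)
--     my_sum_2 = compute_all_sum(v_base_2, v_exp_2)
--     BOOLEAN_1_LARGER = True
--     BOOLEAN_2_LARGER = True
--     for list_1, list_2 in zip(my_sum_1, my_sum_2):
--         L1 = len(list_1)-1
--         L2 = len(list_2)-1
--
--         for cont in range(max(L1,L2)+1):
--             if list_1[min(L1,cont)] > list_2[min(L2,cont)]:
--                 BOOLEAN_2_LARGER = False
--             elif list_1[min(L1,cont)] < list_2[min(L2,cont)]:
--                 BOOLEAN_1_LARGER = False
--             if not (BOOLEAN_1_LARGER or BOOLEAN_2_LARGER):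
--                 break
--         if not (BOOLEAN_1_LARGER or BOOLEAN_2_LARGER):
--             break
--     return BOOLEAN_1_LARGER, BOOLEAN_2_LARGER
-- ===== SOURCE B (Python) =====
-- def _segments(v_base, v_exp, partial):
--     # One (first_value, step, count) triple per (base, exponent) entry with a
--     # positive exponent; never expands the runs.
--     all_segs = []
--     for base, exp in zip(v_base, v_exp):
--         segs = []
--         for b, e in zip(base, exp):
--             if e > 0:
--                 segs.append((partial + b, b, e))
--                 partial += b * e
--         all_segs.append(segs)
--     return all_segs
--
--
-- def _clamped(segs, T):
--     # Pad with a constant run of the last value so the total count becomes T.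
--     total = sum(c for _, _, c in segs)
--     if total < T:
--         a, b, c = segs[-1]
--         return segs + [(a + b * (c - 1), 0, T - total)]
--     return segs
--
--
-- def who_is_larger__pair(pair_1, pair_2):
--     all_1 = _segments(pair_1[0], pair_1[1], 0)
--     all_2 = _segments(pair_2[0], pair_2[1], 0)
--     f1 = True
--     f2 = True
--     for segs1, segs2 in zip(all_1, all_2):
--         T = max(sum(c for _, _, c in segs1), sum(c for _, _, c in segs2))
--         l1 = _clamped(segs1, T)
--         l2 = _clamped(segs2, T)
--         while l1 and l2:
--             a1, b1, c1 = l1[0]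
--             a2, b2, c2 = l2[0]
--             m = min(c1, c2)
--             d0 = a1 - a2
--             dm = (a1 + b1 * (m - 1)) - (a2 + b2 * (m - 1))
--             if d0 > 0 or dm > 0:
--                 f2 = False
--             if d0 < 0 or dm < 0:
--                 f1 = False
--             l1 = l1[1:] if c1 == m else [(a1 + b1 * m, b1, c1 - m)] + l1[1:]
--             l2 = l2[1:] if c2 == m else [(a2 + b2 * m, b2, c2 - m)] + l2[1:]
--         if not (f1 or f2):
--             break
--     return f1, f2
-- ===== Notes on version B (the rewrite author's own statement) =====
-- stated objective: faster
-- what changed: B never expands an exponent: it builds one (start, step, count) segment per positive exponent and compares the two piecewise-arithmetic prefix-sum sequences interval by interval, deciding each overlap from the linear difference at its two endpoints, instead of A's materialising every repeated partial sum and scanning position by position.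
import Mathlib
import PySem

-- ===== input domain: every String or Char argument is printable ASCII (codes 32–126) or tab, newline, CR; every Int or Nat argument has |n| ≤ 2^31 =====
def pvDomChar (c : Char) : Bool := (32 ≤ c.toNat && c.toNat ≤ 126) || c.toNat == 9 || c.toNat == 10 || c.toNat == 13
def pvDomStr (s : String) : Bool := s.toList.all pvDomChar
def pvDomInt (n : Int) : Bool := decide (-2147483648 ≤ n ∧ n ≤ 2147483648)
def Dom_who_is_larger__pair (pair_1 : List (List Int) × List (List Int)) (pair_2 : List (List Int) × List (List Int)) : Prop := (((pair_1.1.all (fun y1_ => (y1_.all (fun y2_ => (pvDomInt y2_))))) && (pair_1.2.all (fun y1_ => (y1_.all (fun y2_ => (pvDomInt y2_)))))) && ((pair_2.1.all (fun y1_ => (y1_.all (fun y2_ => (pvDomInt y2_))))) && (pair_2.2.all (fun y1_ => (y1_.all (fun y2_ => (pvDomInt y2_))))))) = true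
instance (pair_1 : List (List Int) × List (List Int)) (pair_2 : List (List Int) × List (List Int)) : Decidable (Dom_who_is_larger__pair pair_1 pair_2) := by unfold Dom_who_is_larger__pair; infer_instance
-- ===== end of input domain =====

-- B compares the two piecewise-arithmetic prefix-sum sequences segment by segment
-- (endpoints of each overlap interval) instead of expanding every exponent; equivalence
-- of the return values is proved on Pre_.

-- ===== PORT A =====
-- O(1) indexing used by the comparison loop; on the nonnegative indices the loop
-- produces it computes exactly list_[i] (see aIdx_eq below)
def aIdx (xs : Array Int) (i : Int) : Int := xs.getD i.toNat 0

-- inner `for _ in range(e): partial_sum += b; v_sum_aus.append(partial_sum)`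
-- (the appends are accumulated in reverse and reversed once at the end of aSub)
def aRun (b e : Int) (st : Int × List Int) : Int × List Int :=
  (PySem.List.pyRange 0 e 1).foldl (fun s _ => (s.1 + b, (s.1 + b) :: s.2)) st

-- `for cont_1 in range(len(base)): b = base[cont_1]; e = exp[cont_1]; …`
-- (out-of-range exp[cont_1] is IndexError in Python: defaulted here, excluded by Pre_)
def aSub (base exp : List Int) (p : Int) : Int × List Int :=
  (PySem.List.pyRange 0 (base.length : Int) 1).foldl
    (fun s c => aRun (PySem.List.pyGetD base c 0) (PySem.List.pyGetD exp c 0) s)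
    (p, [])
  |> fun r => (r.1, r.2.reverse)

def compute_all_sum (v_base v_exp : List (List Int)) : List (List Int) :=
  ((List.zip v_base v_exp).foldl
    (fun (s : Int × List (List Int)) be =>
      let r := aSub be.1 be.2 s.1
      (r.1, s.2 ++ [r.2]))
    (0, [])).2

-- `for cont in range(max(L1,L2)+1): …` with the two flag updates and the break
-- (list_1[min(L1,cont)] on an empty list is IndexError in Python: defaulted, excluded by Pre_)
def aCmp (l1 l2 : Array Int) (L1 L2 : Int) : List Int → Bool → Bool → Bool × Bool
  | [], f1, f2 => (f1, f2)
  | c :: rest, f1, f2 =>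
    let x := aIdx l1 (min L1 c)
    let y := aIdx l2 (min L2 c)
    let f2' := if x > y then false else f2
    let f1' := if x < y then false else f1
    if !(f1' || f2') then (f1', f2') else aCmp l1 l2 L1 L2 rest f1' f2'

def aOuter : List (List Int × List Int) → Bool → Bool → Bool × Bool
  | [], f1, f2 => (f1, f2)
  | (l1, l2) :: rest, f1, f2 =>
    let L1 : Int := (l1.length : Int) - 1
    let L2 : Int := (l2.length : Int) - 1
    let r := aCmp l1.toArray l2.toArray L1 L2 (PySem.List.pyRange 0 (max L1 L2 + 1) 1) f1 f2
    if !(r.1 || r.2) then r else aOuter rest r.1 r.2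

def who_is_larger__pair (pair_1 : List (List Int) × List (List Int)) (pair_2 : List (List Int) × List (List Int)) : Bool × Bool :=
  let my_sum_1 := compute_all_sum pair_1.1 pair_1.2
  let my_sum_2 := compute_all_sum pair_2.1 pair_2.2
  aOuter (List.zip my_sum_1 my_sum_2) true true

-- ===== PORT B =====
-- one (first value, step, count) triple per positive exponent; no expansion
def bSegs (v_base v_exp : List (List Int)) (p : Int) : List (List (Int × Int × Int)) :=
  ((List.zip v_base v_exp).foldl
    (fun (s : Int × List (List (Int × Int × Int))) be =>
      let inner := (List.zip be.1 be.2).foldl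
        (fun (t : Int × List (Int × Int × Int)) x =>
          if x.2 > 0 then (t.1 + x.1 * x.2, t.2 ++ [(t.1 + x.1, x.1, x.2)]) else t)
        (s.1, [])
      (inner.1, s.2 ++ [inner.2]))
    (p, [])).2

def segTotal (segs : List (Int × Int × Int)) : Int := (segs.map (fun s => s.2.2)).sum

-- pad with a constant run of the last value (segs[-1] on [] is IndexError in Python B,
-- reached only on inputs excluded by Pre_)
def bClamped (segs : List (Int × Int × Int)) (T : Int) : List (Int × Int × Int) :=
  if segTotal segs < T then
    match PySem.List.pyGet? segs (-1) with
    | some s => segs ++ [(s.1 + s.2.1 * (s.2.2 - 1), 0, T - segTotal segs)]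
    | none => segs
  else segs

-- the `while l1 and l2` merge: compare the linear difference at both endpoints of the overlap
def bMerge : List (Int × Int × Int) → List (Int × Int × Int) → Bool → Bool → Bool × Bool
  | [], _, f1, f2 => (f1, f2)
  | _ :: _, [], f1, f2 => (f1, f2)
  | (a1, b1, c1) :: t1, (a2, b2, c2) :: t2, f1, f2 =>
    let m := min c1 c2
    let d0 := a1 - a2
    let dm := (a1 + b1 * (m - 1)) - (a2 + b2 * (m - 1))
    let f2' := if d0 > 0 ∨ dm > 0 then false else f2
    let f1' := if d0 < 0 ∨ dm < 0 then false else f1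
    bMerge (if c1 = m then t1 else (a1 + b1 * m, b1, c1 - m) :: t1)
           (if c2 = m then t2 else (a2 + b2 * m, b2, c2 - m) :: t2) f1' f2'
  termination_by l1 l2 => l1.length + l2.length
  decreasing_by
    rcases min_choice c1 c2 with h | h <;> split_ifs <;>
      simp only [List.length_cons] <;> omega

def bOuter : List (List (Int × Int × Int) × List (Int × Int × Int)) → Bool → Bool → Bool × Bool
  | [], f1, f2 => (f1, f2)
  | (s1, s2) :: rest, f1, f2 =>
    let T := max (segTotal s1) (segTotal s2)
    let r := bMerge (bClamped s1 T) (bClamped s2 T) f1 f2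
    if !(r.1 || r.2) then r else bOuter rest r.1 r.2

def who_is_larger__pair_alt (pair_1 : List (List Int) × List (List Int)) (pair_2 : List (List Int) × List (List Int)) : Bool × Bool :=
  bOuter (List.zip (bSegs pair_1.1 pair_1.2 0) (bSegs pair_2.1 pair_2.2 0)) true true

-- ===== PRECONDITION & SPEC =====
-- Pre_ excludes only A's crash inputs: an exponent list shorter than its base list
-- (IndexError in compute_all_sum), and a compared pair whose expanded prefix-sum
-- sequence is empty on exactly one side (IndexError at list[-1] when that pair is
-- reached); whether such a pair is reached before the early break is not a closed-form
-- condition, so all inputs containing one are excluded — on the excluded inputs where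
-- the break fires first and A still returns (False, False), B breaks at the same pair
-- and returns the same (False, False).  Pairs empty on both sides are inside Pre_.
def Pre_who_is_larger__pair (pair_1 : List (List Int) × List (List Int)) (pair_2 : List (List Int) × List (List Int)) : Prop :=
  (∀ be ∈ List.zip pair_1.1 pair_1.2, be.1.length ≤ be.2.length) ∧
  (∀ be ∈ List.zip pair_2.1 pair_2.2, be.1.length ≤ be.2.length) ∧
  (∀ q ∈ List.zip (List.zip pair_1.1 pair_1.2) (List.zip pair_2.1 pair_2.2),
    ((∃ r ∈ List.zip q.1.1 q.1.2, 0 < r.2) ↔ (∃ r ∈ List.zip q.2.1 q.2.2, 0 < r.2)))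
instance (pair_1 : List (List Int) × List (List Int)) (pair_2 : List (List Int) × List (List Int)) : Decidable (Pre_who_is_larger__pair pair_1 pair_2) := by unfold Pre_who_is_larger__pair; infer_instance

def pvWitness_who_is_larger__pair : (List (List Int) × List (List Int)) × (List (List Int) × List (List Int)) :=
  (([[1]], [[1]]), ([[2]], [[1]]))

def Spec_who_is_larger__pair (pair_1 : List (List Int) × List (List Int)) (pair_2 : List (List Int) × List (List Int)) (out : Bool × Bool) : Prop := out = who_is_larger__pair_alt pair_1 pair_2
instance (pair_1 : List (List Int) × List (List Int)) (pair_2 : List (List Int) × List (List Int)) (out : Bool × Bool) : Decidable (Spec_who_is_larger__pair pair_1 pair_2 out) := by unfold Spec_who_is_larger__pair; infer_instance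

-- ===== CLAIM (what is proved, stated in full; the proofs are below) =====
def Claim_equal_who_is_larger__pair : Prop := ∀ (pair_1 : List (List Int) × List (List Int)) (pair_2 : List (List Int) × List (List Int)), Dom_who_is_larger__pair pair_1 pair_2 → Pre_who_is_larger__pair pair_1 pair_2 → Spec_who_is_larger__pair pair_1 pair_2 (who_is_larger__pair pair_1 pair_2)

-- ===== LEMMAS AND PROOFS =====

-- expansion of a segment list back to the value sequence it denotes
def vals (segs : List (Int × Int × Int)) : List Int :=
  segs.flatMap (fun s => (List.range s.2.2.toNat).map (fun (k : Nat) => s.1 + s.2.1 * (k : Int)))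

-- spec-level segment list of one (base, exp) pair, threading the partial sum
def segsOf : List (Int × Int) → Int → List (Int × Int × Int)
  | [], _ => []
  | (b, e) :: r, p => if 0 < e then (p + b, b, e) :: segsOf r (p + b * e) else segsOf r p

def deltaOf : List (Int × Int) → Int
  | [] => 0
  | (b, e) :: r => b * (e.toNat : Int) + deltaOf r

-- spec-level list of segment lists for the whole input, threading the partial sum
def specList : List (List Int × List Int) → Int → List (List (Int × Int × Int))
  | [], _ => []
  | be :: r, p => segsOf (List.zip be.1 be.2) p :: specList r (p + deltaOf (List.zip be.1 be.2))

-- every count stored in a segment list is positive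
def countsPos (s : List (Int × Int × Int)) : Prop := ∀ t ∈ s, 0 < t.2.2

def endP : List (List Int × List Int) → Int → Int
  | [], p => p
  | be :: r, p => endP r (p + deltaOf (List.zip be.1 be.2))

-- ---- step 1: A's innermost expansion loop in closed form ----
lemma natRun (b : Int) : ∀ (n : Nat) (p : Int) (acc : List Int),
    (List.range n).foldl (fun (s : Int × List Int) _ => (s.1 + b, (s.1 + b) :: s.2)) (p, acc)
      = (p + b * n,
         ((List.range n).map (fun (k : Nat) => p + b * ((k : Int) + 1))).reverse ++ acc) := by
  intro n
  induction n with
  | zero => simp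
  | succ n ih =>
    intro p acc
    rw [List.range_succ, List.foldl_append, ih]
    simp only [List.foldl_cons, List.foldl_nil, List.map_append, List.map_cons, List.map_nil,
      List.reverse_append, List.reverse_cons, List.reverse_nil, List.nil_append,
      List.cons_append, List.append_assoc]
    refine Prod.ext ?_ ?_
    · push_cast; ring
    · congr 1
      push_cast; ring

lemma aRun_eq (b e p : Int) (acc : List Int) :
    aRun b e (p, acc)
      = (p + b * (e.toNat : Int),
         ((List.range e.toNat).map (fun (k : Nat) => p + b * ((k : Int) + 1))).reverse ++ acc) := by
  unfold aRun
  rw [PySem.List.pyRange_one]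
  simp only [Int.sub_zero, List.foldl_map]
  exact natRun b e.toNat p acc

-- ---- step 2: both inner per-sublist loops against the spec functions ----
lemma vals_cons (a b c : Int) (t : List (Int × Int × Int)) :
    vals ((a, b, c) :: t) = (List.range c.toNat).map (fun (k : Nat) => a + b * (k : Int)) ++ vals t := by
  simp [vals]

lemma foldA_eq : ∀ (bes : List (Int × Int)) (p : Int) (acc : List Int),
    bes.foldl (fun s be => aRun be.1 be.2 s) (p, acc)
      = (p + deltaOf bes, (vals (segsOf bes p)).reverse ++ acc) := by
  intro bes
  induction bes with
  | nil => intro p acc; simp [deltaOf, segsOf, vals]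
  | cons be r ih =>
    intro p acc
    obtain ⟨b, e⟩ := be
    rw [List.foldl_cons, aRun_eq, ih]
    by_cases h : 0 < e
    · simp only [segsOf, deltaOf, h, if_pos, vals_cons]
      have he : ((e.toNat : Int)) = e := by omega
      refine Prod.ext ?_ ?_
      · simp only [he]; ring_nf
      · simp only [he, List.reverse_append, List.append_assoc]
        congr 3
        exact List.map_congr_left (fun k _ => by ring)
    · have he : e.toNat = 0 := by omega
      simp [segsOf, deltaOf, h, he]

lemma foldB_eq : ∀ (bes : List (Int × Int)) (p : Int) (acc : List (Int × Int × Int)),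
    bes.foldl
      (fun (t : Int × List (Int × Int × Int)) x =>
        if x.2 > 0 then (t.1 + x.1 * x.2, t.2 ++ [(t.1 + x.1, x.1, x.2)]) else t) (p, acc)
      = (p + deltaOf bes, acc ++ segsOf bes p) := by
  intro bes
  induction bes with
  | nil => intro p acc; simp [deltaOf, segsOf]
  | cons be r ih =>
    intro p acc
    obtain ⟨b, e⟩ := be
    rw [List.foldl_cons]
    by_cases h : 0 < e
    · have he : ((e.toNat : Int)) = e := by omega
      simp only [segsOf, deltaOf, h, if_pos, gt_iff_lt, ih, he]
      refine Prod.ext ?_ ?_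
      · simp; ring_nf
      · simp
    · have he : e.toNat = 0 := by omega
      simp [segsOf, deltaOf, h, he, ih]

-- index loop over range(len(base)) = fold over zip (when exp is long enough)
lemma idx_zip : ∀ (base exp : List Int) (st : Int × List Int), base.length ≤ exp.length →
    (PySem.List.pyRange 0 (base.length : Int) 1).foldl
      (fun s c => aRun (PySem.List.pyGetD base c 0) (PySem.List.pyGetD exp c 0) s) st
      = (List.zip base exp).foldl (fun s be => aRun be.1 be.2 s) st := by
  intro base exp st h
  rw [PySem.List.pyRange_one]
  simp only [Int.sub_zero, Int.toNat_natCast, List.foldl_map]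
  have hfun : (fun (s : Int × List Int) (k : Nat) =>
        aRun (PySem.List.pyGetD base ((0 : Int) + (k : Int)) 0)
             (PySem.List.pyGetD exp ((0 : Int) + (k : Int)) 0) s)
      = fun s k => aRun (base.getD k 0) (exp.getD k 0) s := by
    funext s k
    rw [zero_add, PySem.List.pyGetD_natCast, PySem.List.pyGetD_natCast]
  rw [hfun]
  clear hfun
  induction base generalizing exp st with
  | nil => simp
  | cons b bs ih =>
    match exp with
    | [] => simp at h
    | e :: es =>
      rw [List.length_cons, List.range_succ_eq_map, List.foldl_cons, List.foldl_map]
      simp only [List.getD_cons_zero, List.getD_cons_succ, List.zip_cons_cons, List.foldl_cons]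
      exact ih es _ (by simpa using h)

lemma aSub_eq (base exp : List Int) (p : Int) (h : base.length ≤ exp.length) :
    aSub base exp p = (p + deltaOf (List.zip base exp), vals (segsOf (List.zip base exp) p)) := by
  unfold aSub
  rw [idx_zip base exp _ h, foldA_eq]
  simp

-- ---- step 3: the two builders against specList ----
lemma compute_all_sum_eq : ∀ (z : List (List Int × List Int)) (p : Int) (acc : List (List Int)),
    (∀ be ∈ z, be.1.length ≤ be.2.length) →
    z.foldl (fun (s : Int × List (List Int)) be =>
        let r := aSub be.1 be.2 s.1
        (r.1, s.2 ++ [r.2])) (p, acc)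
      = (endP z p, acc ++ (specList z p).map vals) := by
  intro z
  induction z with
  | nil => intro p acc h; simp [endP, specList]
  | cons be r ih =>
    intro p acc h
    rw [List.foldl_cons]
    simp only [aSub_eq be.1 be.2 p (h be (by simp))]
    rw [ih _ _ (fun x hx => h x (by simp [hx]))]
    simp [endP, specList]

lemma bSegs_eq : ∀ (z : List (List Int × List Int)) (p : Int) (acc : List (List (Int × Int × Int))),
    z.foldl (fun (s : Int × List (List (Int × Int × Int))) be =>
        let inner := (List.zip be.1 be.2).foldl
          (fun (t : Int × List (Int × Int × Int)) x =>
            if x.2 > 0 then (t.1 + x.1 * x.2, t.2 ++ [(t.1 + x.1, x.1, x.2)]) else t)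
          (s.1, [])
        (inner.1, s.2 ++ [inner.2])) (p, acc)
      = (endP z p, acc ++ specList z p) := by
  have specFoldB : ∀ (z : List (List Int × List Int)) (p : Int) (acc : List (List (Int × Int × Int))),
      z.foldl (fun (s : Int × List (List (Int × Int × Int))) be =>
          (s.1 + deltaOf (List.zip be.1 be.2), s.2 ++ [segsOf (List.zip be.1 be.2) s.1])) (p, acc)
        = (endP z p, acc ++ specList z p) := by
    intro z
    induction z with
    | nil => intro p acc; simp [endP, specList]
    | cons be r ih =>
      intro p acc
      rw [List.foldl_cons, ih]
      simp [endP, specList]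
  intro z p acc
  rw [show (fun (s : Int × List (List (Int × Int × Int))) (be : List Int × List Int) =>
        let inner := (List.zip be.1 be.2).foldl
          (fun (t : Int × List (Int × Int × Int)) x =>
            if x.2 > 0 then (t.1 + x.1 * x.2, t.2 ++ [(t.1 + x.1, x.1, x.2)]) else t)
          (s.1, [])
        (inner.1, s.2 ++ [inner.2]))
      = (fun (s : Int × List (List (Int × Int × Int))) be =>
          (s.1 + deltaOf (List.zip be.1 be.2), s.2 ++ [segsOf (List.zip be.1 be.2) s.1]))
      from funext fun s => funext fun be => by simp [foldB_eq]]
  exact specFoldB z p acc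

-- ---- step 4: A's comparison loop is a pair of `all`s over the index list ----
lemma aIdx_eq (l : List Int) (i : Int) (h : 0 ≤ i) :
    aIdx l.toArray i = PySem.List.pyGetD l i 0 := by
  unfold aIdx
  rw [PySem.List.pyGetD, PySem.List.pyGet?_of_nonneg l h]
  simp [Array.getD]
  split
  · rename_i hlt
    rw [List.getElem?_eq_getElem (by simpa using hlt)]
    simp
  · rename_i hge
    rw [List.getElem?_eq_none (by simpa using hge)]
    rfl

lemma aCmp_eq (l1 l2 : Array Int) (L1 L2 : Int) : ∀ (conts : List Int) (f1 f2 : Bool),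
    aCmp l1 l2 L1 L2 conts f1 f2
      = (f1 && conts.all (fun c => !decide (aIdx l1 (min L1 c) < aIdx l2 (min L2 c))),
         f2 && conts.all (fun c => !decide (aIdx l1 (min L1 c) > aIdx l2 (min L2 c)))) := by
  intro conts
  induction conts with
  | nil => intro f1 f2; simp [aCmp]
  | cons c rest ih =>
    intro f1 f2
    rw [aCmp]
    simp only [List.all_cons]
    set x := aIdx l1 (min L1 c) with hx
    set y := aIdx l2 (min L2 c) with hy
    by_cases hgt : x > y
    · have hlt : ¬ x < y := by omega
      simp only [hgt, hlt, if_pos, if_neg, not_false_eq_true, decide_true, decide_false,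
        Bool.not_true, Bool.not_false, Bool.and_false, Bool.false_and]
      by_cases hf1 : f1 = true
      · subst hf1; simp [ih]
      · simp only [Bool.not_eq_true] at hf1; subst hf1
        simp
    · by_cases hlt : x < y
      · simp only [hgt, hlt, if_pos, if_neg, not_false_eq_true, decide_true, decide_false,
          Bool.not_true, Bool.not_false, Bool.and_false, Bool.false_and]
        by_cases hf2 : f2 = true
        · subst hf2; simp [ih]
        · simp only [Bool.not_eq_true] at hf2; subst hf2
          simp
      · simp only [hgt, hlt, if_neg, not_false_eq_true, decide_false, Bool.not_false,
          Bool.and_true]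
        have : (!(f1 || f2)) = true → (f1 = false ∧ f2 = false) := by
          intro hh; constructor <;> [skip; skip] <;> revert hh <;> cases f1 <;> cases f2 <;> simp
        by_cases hb : (!(f1 || f2)) = true
        · obtain ⟨e1, e2⟩ := this hb
          subst e1; subst e2
          simp [ih]
        · simp only [Bool.not_eq_true] at hb
          rw [if_neg (by simp [hb])]
          rw [ih]
          simp [Bool.and_assoc]

-- ---- step 5: a linear difference is nonnegative on [0, m) iff it is at both endpoints ----
lemma lin_forall (m α β : Int) (hm : 1 ≤ m) :
    (∀ k : Int, 0 ≤ k → k < m → 0 ≤ α + β * k) ↔ (0 ≤ α ∧ 0 ≤ α + β * (m - 1)) := by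
  constructor
  · intro h
    exact ⟨by simpa using h 0 le_rfl (by omega), h (m - 1) (by omega) (by omega)⟩
  · rintro ⟨h0, h1⟩ k hk0 hkm
    by_cases hb : 0 ≤ β
    · have : 0 ≤ β * k := mul_nonneg hb hk0
      omega
    · have : β * (m - 1) ≤ β * k := by
        apply mul_le_mul_of_nonpos_left (by omega) (by omega)
      omega

lemma all_range_not_lt (m : Int) (hm : 1 ≤ m) (a1 b1 a2 b2 : Int) :
    (List.range m.toNat).all
        (fun (k : Nat) => !decide (a1 + b1 * (k : Int) < a2 + b2 * (k : Int)))
      = !decide (a1 - a2 < 0 ∨ (a1 + b1 * (m - 1)) - (a2 + b2 * (m - 1)) < 0) := by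
  rw [Bool.eq_iff_iff]
  simp only [List.all_eq_true, List.mem_range, Bool.not_eq_true', decide_eq_false_iff_not,
    not_lt, not_or]
  constructor
  · intro h
    have h' : ∀ k : Int, 0 ≤ k → k < m → 0 ≤ (a1 - a2) + (b1 - b2) * k := by
      intro k hk0 hkm
      have := h k.toNat (by omega)
      have hc : ((k.toNat : Nat) : Int) = k := by omega
      rw [hc] at this
      nlinarith [this]
    have := (lin_forall m (a1 - a2) (b1 - b2) hm).mp h'
    constructor <;> nlinarith [this.1, this.2]
  · rintro ⟨h0, h1⟩
    intro k hk
    have := (lin_forall m (a1 - a2) (b1 - b2) hm).mpr ⟨by omega, by nlinarith⟩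
    have hk' : ((k : Nat) : Int) < m := by omega
    have := this k (by omega) hk'
    nlinarith [this]

-- ---- step 6: facts about vals ----
lemma vals_ne_nil : ∀ (s : List (Int × Int × Int)), countsPos s → s ≠ [] → vals s ≠ [] := by
  rintro (_ | ⟨⟨a, b, c⟩, t⟩) h hne
  · exact absurd rfl hne
  · have hc : 0 < c := h (a, b, c) (by simp)
    rw [vals_cons]
    intro hbad
    have : (List.range c.toNat).map (fun (k : Nat) => a + b * (k : Int)) = [] :=
      List.eq_nil_of_append_eq_nil hbad |>.1
    have := congrArg List.length this
    simp at this
    omega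

lemma length_vals : ∀ (s : List (Int × Int × Int)), countsPos s →
    ((vals s).length : Int) = segTotal s := by
  rintro s h
  induction s with
  | nil => simp [vals, segTotal]
  | cons t r ih =>
    obtain ⟨a, b, c⟩ := t
    have hc : 0 < c := h (a, b, c) (by simp)
    rw [vals_cons]
    have := ih (fun x hx => h x (by simp [hx]))
    simp only [List.length_append, List.length_map, List.length_range, segTotal, List.map_cons,
      List.sum_cons] at *
    push_cast
    omega

lemma vals_getLast? : ∀ (s : List (Int × Int × Int)), countsPos s →
    ∀ a b c : Int, s.getLast? = some (a, b, c) → (vals s).getLast? = some (a + b * (c - 1)) := by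
  intro s
  induction s with
  | nil => intro h a b c hl; simp at hl
  | cons x t ih =>
    intro h a b c hl
    match t with
    | [] =>
      obtain ⟨a', b', c'⟩ := x
      simp only [List.getLast?_singleton, Option.some.injEq, Prod.mk.injEq] at hl
      obtain ⟨rfl, rfl, rfl⟩ := hl
      have hc : 0 < c' := h (a', b', c') (by simp)
      rw [show vals [(a', b', c')]
            = (List.range c'.toNat).map (fun (k : Nat) => a' + b' * (k : Int)) from by simp [vals]]
      rw [List.getLast?_eq_getElem?]
      rw [List.getElem?_eq_getElem (by simp; omega)]
      simp only [List.getElem_map, List.getElem_range, List.length_map, List.length_range,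
        Option.some.injEq]
      rw [show ((c'.toNat - 1 : Nat) : Int) = c' - 1 from by omega]
    | y :: t' =>
      have hcp : countsPos (y :: t') := fun z hz => h z (by simp [hz])
      have ht : vals (y :: t') ≠ [] := vals_ne_nil _ hcp (by simp)
      rw [show vals (x :: y :: t') = vals [x] ++ vals (y :: t') from by simp [vals]]
      rw [List.getLast?_append_of_ne_nil _ ht]
      rw [List.getLast?_cons_cons] at hl
      exact ih hcp a b c hl

lemma segsOf_countsPos : ∀ (bes : List (Int × Int)) (p : Int), countsPos (segsOf bes p) := by
  intro bes
  induction bes with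
  | nil => intro p; intro t ht; simp [segsOf] at ht
  | cons be r ih =>
    intro p t ht
    obtain ⟨b, e⟩ := be
    by_cases h : 0 < e
    · rw [segsOf, if_pos h] at ht
      rcases List.mem_cons.mp ht with h' | h'
      · subst h'; exact h
      · exact ih _ t h'
    · rw [segsOf, if_neg h] at ht
      exact ih _ t ht

lemma segsOf_ne_nil : ∀ (bes : List (Int × Int)) (p : Int),
    (∃ r ∈ bes, 0 < r.2) → segsOf bes p ≠ [] := by
  intro bes
  induction bes with
  | nil => rintro p ⟨r, hr, _⟩; simp at hr
  | cons be r ih =>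
    rintro p ⟨x, hx, hxpos⟩
    obtain ⟨b, e⟩ := be
    by_cases h : 0 < e
    · rw [segsOf, if_pos h]; simp
    · rw [segsOf, if_neg h]
      rcases List.mem_cons.mp hx with h' | h'
      · exfalso; subst h'; exact h hxpos
      · exact ih p ⟨x, h', hxpos⟩

lemma segsOf_eq_nil : ∀ (bes : List (Int × Int)) (p : Int),
    (¬ ∃ r ∈ bes, 0 < r.2) → segsOf bes p = [] := by
  intro bes
  induction bes with
  | nil => intro p _; rfl
  | cons be r ih =>
    intro p h
    obtain ⟨b, e⟩ := be
    have he : ¬ 0 < e := fun hc => h ⟨(b, e), by simp, hc⟩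
    rw [segsOf, if_neg he]
    exact ih p (fun ⟨x, hx, hxp⟩ => h ⟨x, by simp [hx], hxp⟩)

-- ---- step 7: clamping, on both sides ----
lemma clamp_vals (s : List (Int × Int × Int)) (T : Int) (h : countsPos s) (hs : s ≠ [])
    (hT : segTotal s ≤ T) :
    vals (bClamped s T)
      = vals s ++ List.replicate (T - segTotal s).toNat ((vals s).getLastD 0) := by
  obtain ⟨⟨a, b, c⟩, hx⟩ : ∃ x, s.getLast? = some x := by
    cases hxx : s.getLast? with
    | none => exact absurd (List.getLast?_eq_none_iff.mp hxx) hs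
    | some x => exact ⟨x, rfl⟩
  unfold bClamped
  rw [PySem.List.pyGet?_neg_one, hx]
  by_cases hlt : segTotal s < T
  · rw [if_pos hlt]
    rw [show vals (s ++ [(a + b * (c - 1), 0, T - segTotal s)])
          = vals s ++ vals [(a + b * (c - 1), 0, T - segTotal s)] from by simp [vals]]
    congr 1
    rw [show vals [(a + b * (c - 1), 0, T - segTotal s)]
          = (List.range (T - segTotal s).toNat).map
              (fun (k : Nat) => (a + b * (c - 1)) + 0 * (k : Int)) from by simp [vals]]
    rw [List.getLastD_eq_getLast?, vals_getLast? s h a b c hx]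
    rw [show (fun (k : Nat) => (a + b * (c - 1)) + 0 * (k : Int))
          = fun (_ : Nat) => a + b * (c - 1) from funext fun k => by ring]
    rw [List.map_const', List.length_range]
    rfl
  · rw [if_neg hlt]
    have h0 : (T - segTotal s).toNat = 0 := by omega
    simp [h0]

lemma bClamped_countsPos (s : List (Int × Int × Int)) (T : Int) (h : countsPos s) :
    countsPos (bClamped s T) := by
  unfold bClamped
  by_cases hlt : segTotal s < T
  · rw [if_pos hlt]
    cases hget : PySem.List.pyGet? s (-1) with
    | none => exact h
    | some x =>
      intro t ht
      rcases List.mem_append.mp ht with h' | h'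
      · exact h t h'
      · simp only [List.mem_singleton] at h'
        subst h'
        simp only []
        omega
  · rw [if_neg hlt]; exact h

lemma bClamped_total (s : List (Int × Int × Int)) (T : Int) (h : countsPos s) (hs : s ≠ [])
    (hT : segTotal s ≤ T) : segTotal (bClamped s T) = T := by
  obtain ⟨x, hx⟩ : ∃ x, PySem.List.pyGet? s (-1) = some x := by
    rw [PySem.List.pyGet?_neg_one]
    cases hxx : s.getLast? with
    | none => exact absurd (List.getLast?_eq_none_iff.mp hxx) hs
    | some y => exact ⟨y, rfl⟩
  unfold bClamped
  rw [hx]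
  by_cases hlt : segTotal s < T
  · rw [if_pos hlt]
    unfold segTotal
    rw [List.map_append, List.sum_append]
    simp only [List.map_cons, List.map_nil, List.sum_cons, List.sum_nil]
    omega
  · rw [if_neg hlt]; omega

lemma map_clamp (E : List Int) (T : Int) (hne : E ≠ []) (hT : (E.length : Int) ≤ T) :
    (PySem.List.pyRange 0 T 1).map (fun c => PySem.List.pyGetD E (min ((E.length : Int) - 1) c) 0)
      = E ++ List.replicate (T - E.length).toNat (E.getLastD 0) := by
  have hlen : 0 < E.length := List.length_pos_iff.mpr hne
  rw [PySem.List.pyRange_one_append 0 (E.length : Int) T (by positivity) hT, List.map_append]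
  congr 1
  · rw [List.map_congr_left (g := fun c => PySem.List.pyGetD E c 0)
      (fun c hc => by
        rw [PySem.List.mem_pyRange_one] at hc
        congr 1
        omega)]
    simpa [PySem.List.len] using PySem.List.map_pyGetD_pyRange_zero E (0 : Int)
  · rw [List.map_congr_left (g := fun _ => E.getLastD 0)
      (fun c hc => by
        rw [PySem.List.mem_pyRange_one] at hc
        have hm : min ((E.length : Int) - 1) c = (E.length : Int) - 1 := by omega
        rw [hm, PySem.List.pyGetD_eq_getElem E 0 (by omega) (by omega)]
        rw [List.getLastD_eq_getLast?, List.getLast?_eq_getElem?]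
        rw [List.getElem?_eq_getElem (by omega)]
        simp only [Option.getD_some]
        congr 1
        omega)]
    rw [List.map_const', PySem.List.length_pyRange_one]

-- ---- step 8: the merge loop is a pair of `all`s over the zipped expansions ----
lemma if_flag (P : Prop) [Decidable P] (f : Bool) : (if P then false else f) = (f && !decide P) := by
  split_ifs with h <;> simp [h]

lemma segTotal_cons (a b c : Int) (t : List (Int × Int × Int)) :
    segTotal ((a, b, c) :: t) = c + segTotal t := by
  simp [segTotal]

lemma vals_split (a b c m : Int) (t : List (Int × Int × Int)) (h0 : 0 < m) (hm : m ≤ c) :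
    vals ((a, b, c) :: t)
      = (List.range m.toNat).map (fun (k : Nat) => a + b * (k : Int))
        ++ vals (if c = m then t else (a + b * m, b, c - m) :: t) := by
  by_cases hc : c = m
  · subst hc; rw [if_pos rfl, vals_cons]
  · rw [if_neg hc, vals_cons, vals_cons]
    rw [show c.toNat = m.toNat + (c - m).toNat from by omega, List.range_add]
    rw [List.map_append, List.append_assoc]
    congr 1
    congr 1
    rw [List.map_map]
    apply List.map_congr_left
    intro k _
    simp only [Function.comp_apply]
    rw [show ((m.toNat + k : Nat) : Int) = m + (k : Int) from by
      push_cast [Int.toNat_of_nonneg (by omega : (0 : Int) ≤ m)]; ring]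
    ring

lemma bMerge_eq : ∀ (l1 l2 : List (Int × Int × Int)) (f1 f2 : Bool),
    countsPos l1 → countsPos l2 → segTotal l1 = segTotal l2 →
    bMerge l1 l2 f1 f2
      = (f1 && (List.zip (vals l1) (vals l2)).all (fun q => !decide (q.1 < q.2)),
         f2 && (List.zip (vals l1) (vals l2)).all (fun q => !decide (q.1 > q.2))) := by
  have main : ∀ (n : Nat) (l1 l2 : List (Int × Int × Int)) (f1 f2 : Bool),
      l1.length + l2.length ≤ n → countsPos l1 → countsPos l2 → segTotal l1 = segTotal l2 →
      bMerge l1 l2 f1 f2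
        = (f1 && (List.zip (vals l1) (vals l2)).all (fun q => !decide (q.1 < q.2)),
           f2 && (List.zip (vals l1) (vals l2)).all (fun q => !decide (q.1 > q.2))) := by
    intro n
    induction n with
    | zero =>
      intro l1 l2 f1 f2 hn h1 h2 heq
      have e1 : l1 = [] := by cases l1 <;> simp_all
      have e2 : l2 = [] := by cases l2 <;> simp_all
      subst e1; subst e2
      simp [bMerge, vals]
    | succ n ih =>
      intro l1 l2 f1 f2 hn h1 h2 heq
      match l1, l2 with
      | [], l2 => simp [bMerge, vals]
      | x :: t1, [] => simp [bMerge, vals]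
      | (a1, b1, c1) :: t1, (a2, b2, c2) :: t2 =>
        have hc1 : 0 < c1 := h1 (a1, b1, c1) (by simp)
        have hc2 : 0 < c2 := h2 (a2, b2, c2) (by simp)
        simp only [bMerge]
        set m := min c1 c2 with hmdef
        have hkey : c1 = m ∨ c2 = m := by omega
        have hm1 : 1 ≤ m := by omega
        set l1' := if c1 = m then t1 else (a1 + b1 * m, b1, c1 - m) :: t1 with hl1'
        set l2' := if c2 = m then t2 else (a2 + b2 * m, b2, c2 - m) :: t2 with hl2'
        have h1' : countsPos l1' := by
          intro t ht
          rw [hl1'] at ht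
          by_cases h : c1 = m
          · rw [if_pos h] at ht; exact h1 t (by simp [ht])
          · rw [if_neg h] at ht
            rcases List.mem_cons.mp ht with h' | h'
            · subst h'; simp only []; omega
            · exact h1 t (by simp [h'])
        have h2' : countsPos l2' := by
          intro t ht
          rw [hl2'] at ht
          by_cases h : c2 = m
          · rw [if_pos h] at ht; exact h2 t (by simp [ht])
          · rw [if_neg h] at ht
            rcases List.mem_cons.mp ht with h' | h'
            · subst h'; simp only []; omega
            · exact h2 t (by simp [h'])
        have hlen' : l1'.length + l2'.length ≤ n := by
          rw [hl1', hl2']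
          simp only [List.length_cons] at hn
          rcases hkey with h | h
          · rw [if_pos h]
            by_cases h2m : c2 = m
            · rw [if_pos h2m]; omega
            · rw [if_neg h2m]; simp only [List.length_cons]; omega
          · rw [if_pos h]
            by_cases h1m : c1 = m
            · rw [if_pos h1m]; omega
            · rw [if_neg h1m]; simp only [List.length_cons]; omega
        have heq' : segTotal l1' = segTotal l2' := by
          have e1 : segTotal l1' = c1 - m + segTotal t1 := by
            rw [hl1']
            by_cases h : c1 = m
            · rw [if_pos h]; omega
            · rw [if_neg h, segTotal_cons]
          have e2 : segTotal l2' = c2 - m + segTotal t2 := by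
            rw [hl2']
            by_cases h : c2 = m
            · rw [if_pos h]; omega
            · rw [if_neg h, segTotal_cons]
          rw [segTotal_cons, segTotal_cons] at heq
          omega
        rw [ih l1' l2' _ _ hlen' h1' h2' heq']
        rw [vals_split a1 b1 c1 m t1 (by omega) (by omega),
            vals_split a2 b2 c2 m t2 (by omega) (by omega)]
        rw [← hl1', ← hl2']
        rw [List.zip_append (by simp)]
        rw [List.all_append, List.all_append]
        rw [List.zip_map']
        rw [List.all_map, List.all_map]
        simp only [gt_iff_lt, Function.comp_def]
        rw [all_range_not_lt m hm1 a1 b1 a2 b2]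
        rw [all_range_not_lt m hm1 a2 b2 a1 b1]
        rw [if_flag, if_flag]
        have hdec : decide (0 < a1 - a2 ∨ 0 < a1 + b1 * (m - 1) - (a2 + b2 * (m - 1)))
            = decide (a2 - a1 < 0 ∨ a2 + b2 * (m - 1) - (a1 + b1 * (m - 1)) < 0) := by
          rw [decide_eq_decide]
          constructor <;> rintro (h | h)
          · left; linarith
          · right; linarith
          · left; linarith
          · right; linarith
        rw [hdec]
        refine Prod.ext ?_ ?_ <;> simp [Bool.and_assoc]
  intro l1 l2 f1 f2 h1 h2 heq
  exact main (l1.length + l2.length) l1 l2 f1 f2 le_rfl h1 h2 heq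

-- ---- step 9: one compared pair, A-side = B-side ----
lemma pair_eq (s1 s2 : List (Int × Int × Int)) (f1 f2 : Bool)
    (h1 : countsPos s1) (h2 : countsPos s2) (n1 : s1 ≠ []) (n2 : s2 ≠ []) :
    aCmp (vals s1).toArray (vals s2).toArray
        (((vals s1).length : Int) - 1) (((vals s2).length : Int) - 1)
        (PySem.List.pyRange 0
          (max (((vals s1).length : Int) - 1) (((vals s2).length : Int) - 1) + 1) 1) f1 f2
      = bMerge (bClamped s1 (max (segTotal s1) (segTotal s2)))
               (bClamped s2 (max (segTotal s1) (segTotal s2))) f1 f2 := by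
  have hne1 : vals s1 ≠ [] := vals_ne_nil s1 h1 n1
  have hne2 : vals s2 ≠ [] := vals_ne_nil s2 h2 n2
  have hp1 : 0 < (vals s1).length := List.length_pos_iff.mpr hne1
  have hp2 : 0 < (vals s2).length := List.length_pos_iff.mpr hne2
  have hlen1 := length_vals s1 h1
  have hlen2 := length_vals s2 h2
  set T := max (segTotal s1) (segTotal s2) with hT
  have hT1 : segTotal s1 ≤ T := le_max_left _ _
  have hT2 : segTotal s2 ≤ T := le_max_right _ _
  have hTeq : max (((vals s1).length : Int) - 1) (((vals s2).length : Int) - 1) + 1 = T := by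
    omega
  rw [aCmp_eq, hTeq]
  rw [bMerge_eq _ _ f1 f2 (bClamped_countsPos s1 T h1) (bClamped_countsPos s2 T h2)
      (by rw [bClamped_total s1 T h1 n1 hT1, bClamped_total s2 T h2 n2 hT2])]
  have key1 : (PySem.List.pyRange 0 T 1).map
      (fun c => PySem.List.pyGetD (vals s1) (min (((vals s1).length : Int) - 1) c) 0)
      = vals (bClamped s1 T) := by
    rw [map_clamp (vals s1) T hne1 (by omega), clamp_vals s1 T h1 n1 hT1, hlen1]
  have key2 : (PySem.List.pyRange 0 T 1).map
      (fun c => PySem.List.pyGetD (vals s2) (min (((vals s2).length : Int) - 1) c) 0)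
      = vals (bClamped s2 T) := by
    rw [map_clamp (vals s2) T hne2 (by omega), clamp_vals s2 T h2 n2 hT2, hlen2]
  have bridge1 : (PySem.List.pyRange 0 T 1).map
      (fun c => aIdx (vals s1).toArray (min (((vals s1).length : Int) - 1) c))
      = vals (bClamped s1 T) := by
    rw [List.map_congr_left
      (g := fun c => PySem.List.pyGetD (vals s1) (min (((vals s1).length : Int) - 1) c) 0)
      (fun c hc => by
        rw [PySem.List.mem_pyRange_one] at hc
        exact aIdx_eq (vals s1) _ (by omega))]
    exact key1
  have bridge2 : (PySem.List.pyRange 0 T 1).map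
      (fun c => aIdx (vals s2).toArray (min (((vals s2).length : Int) - 1) c))
      = vals (bClamped s2 T) := by
    rw [List.map_congr_left
      (g := fun c => PySem.List.pyGetD (vals s2) (min (((vals s2).length : Int) - 1) c) 0)
      (fun c hc => by
        rw [PySem.List.mem_pyRange_one] at hc
        exact aIdx_eq (vals s2) _ (by omega))]
    exact key2
  rw [← bridge1, ← bridge2, List.zip_map', List.all_map, List.all_map]
  simp [Function.comp_def]

-- ---- step 10: the outer loops in lockstep (a pair may be empty on BOTH sides:
-- A skips it with an empty range, B merges two empty clamped lists) ----
lemma outer_eq : ∀ (z1 z2 : List (List Int × List Int)) (p1 p2 : Int) (f1 f2 : Bool),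
    (∀ q ∈ List.zip z1 z2,
      ((∃ r ∈ List.zip q.1.1 q.1.2, 0 < r.2) ↔ (∃ r ∈ List.zip q.2.1 q.2.2, 0 < r.2))) →
    aOuter (List.zip ((specList z1 p1).map vals) ((specList z2 p2).map vals)) f1 f2
      = bOuter (List.zip (specList z1 p1) (specList z2 p2)) f1 f2 := by
  intro z1
  induction z1 with
  | nil => intro z2 p1 p2 f1 f2 H; simp [specList, aOuter, bOuter]
  | cons be1 r1 ih =>
    intro z2 p1 p2 f1 f2 H
    match z2 with
    | [] => simp [specList, aOuter, bOuter]
    | be2 :: r2 =>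
      simp only [specList, List.map_cons, List.zip_cons_cons]
      have hiff := H (be1, be2) (by simp)
      set s1 := segsOf (List.zip be1.1 be1.2) p1 with hs1
      set s2 := segsOf (List.zip be2.1 be2.2) p2 with hs2
      by_cases hx1 : ∃ r ∈ List.zip be1.1 be1.2, 0 < r.2
      · have hx2 : ∃ r ∈ List.zip be2.1 be2.2, 0 < r.2 := hiff.mp hx1
        have hcp1 : countsPos s1 := segsOf_countsPos _ _
        have hcp2 : countsPos s2 := segsOf_countsPos _ _
        have hn1 : s1 ≠ [] := segsOf_ne_nil _ _ hx1
        have hn2 : s2 ≠ [] := segsOf_ne_nil _ _ hx2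
        simp only [aOuter, bOuter]
        rw [pair_eq s1 s2 f1 f2 hcp1 hcp2 hn1 hn2]
        set R := bMerge (bClamped s1 (max (segTotal s1) (segTotal s2)))
          (bClamped s2 (max (segTotal s1) (segTotal s2))) f1 f2 with hR
        by_cases hbr : (!(R.1 || R.2)) = true
        · rw [if_pos hbr, if_pos hbr]
        · rw [if_neg hbr, if_neg hbr]
          exact ih r2 _ _ _ _ (fun q hq => H q (by simp [hq]))
      · have hx2 : ¬ ∃ r ∈ List.zip be2.1 be2.2, 0 < r.2 := fun h => hx1 (hiff.mpr h)
        have e1 : s1 = [] := segsOf_eq_nil _ _ hx1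
        have e2 : s2 = [] := segsOf_eq_nil _ _ hx2
        rw [e1, e2]
        simp only [aOuter, bOuter]
        have hrange : PySem.List.pyRange 0 (max (((List.length (vals [])) : Int) - 1)
            (((List.length (vals [])) : Int) - 1) + 1) 1 = ([] : List Int) := by
          simp [vals, PySem.List.pyRange_one]
        rw [hrange]
        have hclamp : bClamped [] (max (segTotal []) (segTotal [])) = [] := by
          simp [bClamped, segTotal]
        rw [hclamp]
        simp only [aCmp, bMerge]
        by_cases hbr : (!(f1 || f2)) = true
        · rw [if_pos hbr, if_pos hbr]
        · rw [if_neg hbr, if_neg hbr]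
          exact ih r2 _ _ _ _ (fun q hq => H q (by simp [hq]))

theorem who_is_larger__pair_spec : Claim_equal_who_is_larger__pair := by
  intro pair_1 pair_2 _ hpre
  obtain ⟨h1, h2, h3⟩ := hpre
  unfold Spec_who_is_larger__pair who_is_larger__pair who_is_larger__pair_alt
      compute_all_sum bSegs
  rw [compute_all_sum_eq _ 0 [] h1, compute_all_sum_eq _ 0 [] h2,
      bSegs_eq _ 0 [], bSegs_eq _ 0 []]
  simpa using outer_eq _ _ 0 0 true true h3
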